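-- pv_equiv track=rewrite | github.com/ranausmans/InterviewAI | app.py | process_generated_content
-- ===== SOURCE A (Python) =====
-- def process_generated_content(content, difficulty):
--     questions = []
--     current_question = {}
--
--     for line in content.split('\n'):
--         if line.startswith('question:'):
--             if current_question:
--                 questions.append(current_question)
--                 current_question = {}
--             current_question['question'] = line.replace('question:', '').strip()
--         elif line.startswith('evaluation:'):
--             current_question['evaluation'] = line.replace('evaluation:', '').strip()
--         elif line.startswith('sampleAnswer:'):
--             current_question['sampleAnswer'] = line.replace('sampleAnswer:', '').strip()
--
--     if current_question:
--         questions.append(current_question)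
--
--     return questions
-- ===== SOURCE B (Python) =====
-- def process_generated_content(content, difficulty):
--     lines = content.split('\n')
--     # Phase 1: cut the line list into blocks, each new block starting at a 'question:' line.
--     blocks = []
--     i, n = 0, len(lines)
--     while i < n:
--         j = i + 1
--         while j < n and not lines[j].startswith('question:'):
--             j += 1
--         blocks.append(lines[i:j])
--         i = j
--     # Phase 2: parse each block into a dict; keep only non-empty dicts.
--     questions = []
--     for block in blocks:
--         q = {}
--         for line in block:
--             if line.startswith('question:'):
--                 q['question'] = line.replace('question:', '').strip()
--             elif line.startswith('evaluation:'):
--                 q['evaluation'] = line.replace('evaluation:', '').strip()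
--             elif line.startswith('sampleAnswer:'):
--                 q['sampleAnswer'] = line.replace('sampleAnswer:', '').strip()
--         if q:
--             questions.append(q)
--     return questions
-- ===== Notes on version B (the rewrite author's own statement) =====
-- stated objective: alternative
-- what changed: Replaces A's single-pass accumulator-with-flush loop by a two-phase decomposition: first cut the line list into blocks at 'question:' boundaries, then parse each block independently into a dict and keep the non-empty ones.
import Mathlib
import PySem

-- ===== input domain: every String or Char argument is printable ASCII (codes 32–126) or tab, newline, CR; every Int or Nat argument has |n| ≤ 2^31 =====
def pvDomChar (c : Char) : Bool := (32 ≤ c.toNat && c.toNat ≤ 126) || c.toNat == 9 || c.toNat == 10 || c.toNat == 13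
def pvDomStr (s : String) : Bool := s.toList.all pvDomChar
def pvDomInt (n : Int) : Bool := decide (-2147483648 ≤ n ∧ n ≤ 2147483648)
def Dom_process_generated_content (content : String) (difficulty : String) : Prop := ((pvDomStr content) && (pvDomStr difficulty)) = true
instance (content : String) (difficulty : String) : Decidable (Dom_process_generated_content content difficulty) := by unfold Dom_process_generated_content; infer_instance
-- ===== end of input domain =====

-- B replaces A's single-pass accumulator-flush by a two-phase decomposition (cut the line list
-- into blocks at 'question:' boundaries, then parse each block independently); objective:
-- alternative decomposition, same return value, no speed claim.

-- ===== PORT A =====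
-- one iteration of A's 'for line in content.split('\n')' loop, state = (questions, current_question)
def pgcStepA (st : List (PySem.Dict String String) × PySem.Dict String String) (line : String) :
    List (PySem.Dict String String) × PySem.Dict String String :=
  if PySem.Str.startswith line "question:" then
    let qs := if st.2.items.isEmpty then st.1 else st.1 ++ [st.2]
    (qs, (PySem.Dict.empty).insert "question" (PySem.Str.strip (PySem.Str.replace line "question:" "")))
  else if PySem.Str.startswith line "evaluation:" then
    (st.1, st.2.insert "evaluation" (PySem.Str.strip (PySem.Str.replace line "evaluation:" "")))
  else if PySem.Str.startswith line "sampleAnswer:" then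
    (st.1, st.2.insert "sampleAnswer" (PySem.Str.strip (PySem.Str.replace line "sampleAnswer:" "")))
  else st

def process_generated_content (content : String) (difficulty : String) : List (List (String × String)) :=
  -- content.split('\n'): the separator is the literal nonempty "\n", so split? never returns none
  let st := ((PySem.Str.split? content "\n").getD []).foldl pgcStepA ([], PySem.Dict.empty)
  let questions := if st.2.items.isEmpty then st.1 else st.1 ++ [st.2]
  questions.map (·.items)

-- ===== PORT B =====
-- B's inner per-block line parser (the body of 'for line in block')
def pgcParseLine (q : PySem.Dict String String) (line : String) : PySem.Dict String String :=
  if PySem.Str.startswith line "question:" then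
    q.insert "question" (PySem.Str.strip (PySem.Str.replace line "question:" ""))
  else if PySem.Str.startswith line "evaluation:" then
    q.insert "evaluation" (PySem.Str.strip (PySem.Str.replace line "evaluation:" ""))
  else if PySem.Str.startswith line "sampleAnswer:" then
    q.insert "sampleAnswer" (PySem.Str.strip (PySem.Str.replace line "sampleAnswer:" ""))
  else q

-- B's phase 1: cut the line list into blocks, a new block starting at each 'question:' line
-- (the Python's inner 'while j < n and not lines[j].startswith(...)' scan is the takeWhile/dropWhile split)
def pgcSplitBlocks : List String → List (List String)
  | [] => []
  | x :: rest =>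
    (x :: rest.takeWhile (fun l => !PySem.Str.startswith l "question:")) ::
      pgcSplitBlocks (rest.dropWhile (fun l => !PySem.Str.startswith l "question:"))
termination_by l => l.length
decreasing_by
  simpa using Nat.lt_succ_of_le (List.length_dropWhile_le _ _)

def process_generated_content_alt (content : String) (difficulty : String) : List (List (String × String)) :=
  -- content.split('\n'): the separator is the literal nonempty "\n", so split? never returns none
  let blocks := pgcSplitBlocks ((PySem.Str.split? content "\n").getD [])
  let questions := blocks.foldl
    (fun acc b =>
      let q := b.foldl pgcParseLine PySem.Dict.empty
      if q.items.isEmpty then acc else acc ++ [q]) []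
  questions.map (·.items)

-- ===== PRECONDITION & SPEC =====
def Spec_process_generated_content (content : String) (difficulty : String) (out : List (List (String × String))) : Prop := out = process_generated_content_alt content difficulty
instance (content : String) (difficulty : String) (out : List (List (String × String))) : Decidable (Spec_process_generated_content content difficulty out) := by unfold Spec_process_generated_content; infer_instance

-- ===== CLAIM (what is proved, stated in full; the proofs are below) =====
def Claim_equal_process_generated_content : Prop := ∀ (content : String) (difficulty : String), Dom_process_generated_content content difficulty → Spec_process_generated_content content difficulty (process_generated_content content difficulty)

-- ===== LEMMAS AND PROOFS =====

-- 'append cur iff current_question is truthy'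
def pgcEmit (d : PySem.Dict String String) : List (PySem.Dict String String) :=
  if d.items.isEmpty then [] else [d]

theorem pgcEmit_empty : pgcEmit PySem.Dict.empty = [] := rfl

-- B's result (before the .items projection) as a flatMap over the blocks
def pgcF (bs : List (List String)) : List (PySem.Dict String String) :=
  bs.flatMap (fun b => pgcEmit (b.foldl pgcParseLine PySem.Dict.empty))

-- A's questions-accumulator only ever grows by appending on the right
theorem pgcStepA_acc (l : List String) (qs : List (PySem.Dict String String))
    (cur : PySem.Dict String String) :
    l.foldl pgcStepA (qs, cur)
      = (qs ++ (l.foldl pgcStepA ([], cur)).1, (l.foldl pgcStepA ([], cur)).2) := by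
  induction l generalizing qs cur with
  | nil => simp
  | cons x xs ih =>
    simp only [List.foldl_cons]
    rw [ih (pgcStepA (qs, cur) x).1 (pgcStepA (qs, cur) x).2,
        ih (pgcStepA ([], cur) x).1 (pgcStepA ([], cur) x).2]
    unfold pgcStepA
    split_ifs with h1 h2 h3 <;> simp

-- B's outer foldl over the blocks, with the accumulator pulled out
theorem pgcFoldB_eq (bs : List (List String)) (acc : List (PySem.Dict String String)) :
    bs.foldl
      (fun acc b =>
        let q := b.foldl pgcParseLine PySem.Dict.empty
        if q.items.isEmpty then acc else acc ++ [q]) acc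
      = acc ++ pgcF bs := by
  induction bs generalizing acc with
  | nil => simp [pgcF]
  | cons b bs ih =>
    simp only [List.foldl_cons, pgcF, List.flatMap_cons]
    rw [ih]
    by_cases h : (b.foldl pgcParseLine PySem.Dict.empty).items.isEmpty <;>
      simp [h, pgcEmit, pgcF]

-- pgcStepA on a question line = flush + fresh dict with the question value
theorem pgcStepA_question (cur : PySem.Dict String String) (x : String)
    (h : PySem.Str.startswith x "question:" = true) :
    pgcStepA ([], cur) x
      = (pgcEmit cur,
         (PySem.Dict.empty).insert "question"
           (PySem.Str.strip (PySem.Str.replace x "question:" ""))) := by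
  simp only [pgcStepA, pgcEmit, h, reduceIte]
  split_ifs <;> rfl

-- pgcStepA on a non-question line acts like pgcParseLine on the current dict
theorem pgcStepA_other (cur : PySem.Dict String String) (x : String)
    (h : PySem.Str.startswith x "question:" = false) :
    pgcStepA ([], cur) x = ([], pgcParseLine cur x) := by
  simp only [pgcStepA, pgcParseLine, h, Bool.false_eq_true, reduceIte]
  split_ifs <;> rfl

-- unfolding pgcF ∘ pgcSplitBlocks by one block
theorem pgcG_unfold (l : List String) :
    pgcF (pgcSplitBlocks l)
      = pgcEmit ((l.takeWhile (fun s => !PySem.Str.startswith s "question:")).foldl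
          pgcParseLine PySem.Dict.empty)
        ++ pgcF (pgcSplitBlocks (l.dropWhile (fun s => !PySem.Str.startswith s "question:"))) := by
  cases l with
  | nil => simp [pgcSplitBlocks, pgcF, pgcEmit_empty]
  | cons x xs =>
    rw [List.takeWhile_cons, List.dropWhile_cons]
    cases h : PySem.Str.startswith x "question:" with
    | true =>
      simp only [Bool.not_true, Bool.false_eq_true, reduceIte, List.foldl_nil,
        pgcEmit_empty, List.nil_append]
    | false =>
      simp only [Bool.not_false, reduceIte]
      rw [pgcSplitBlocks]
      simp only [pgcF, List.flatMap_cons]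

-- main invariant: flushing A's loop run from state ([], cur) yields cur extended by the head
-- (pre-first-question) block, followed by B's per-block results for the remaining blocks
theorem pgc_main (l : List String) (cur : PySem.Dict String String) :
    (l.foldl pgcStepA ([], cur)).1 ++ pgcEmit (l.foldl pgcStepA ([], cur)).2
      = pgcEmit ((l.takeWhile (fun s => !PySem.Str.startswith s "question:")).foldl
          pgcParseLine cur)
        ++ pgcF (pgcSplitBlocks (l.dropWhile (fun s => !PySem.Str.startswith s "question:"))) := by
  induction l generalizing cur with
  | nil => simp [pgcSplitBlocks, pgcF]
  | cons x xs ih =>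
    rw [List.takeWhile_cons, List.dropWhile_cons]
    cases h : PySem.Str.startswith x "question:" with
    | true =>
      -- question line: A flushes cur and restarts; B closes the head (empty-prefix) block here
      simp only [Bool.not_true, Bool.false_eq_true, reduceIte, List.foldl_cons,
        List.foldl_nil]
      rw [pgcStepA_question cur x h, pgcStepA_acc, List.append_assoc, ih]
      rw [pgcG_unfold (x :: xs), List.takeWhile_cons, List.dropWhile_cons, h]
      simp only [Bool.not_true, Bool.false_eq_true, reduceIte, List.foldl_nil,
        pgcEmit_empty, List.nil_append]
      rw [pgcSplitBlocks]
      simp only [pgcF, List.flatMap_cons, List.foldl_cons, pgcParseLine, h, reduceIte]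
    | false =>
      -- non-question line: both sides just extend the current dict
      simp only [Bool.not_false, reduceIte, List.foldl_cons]
      rw [pgcStepA_other cur x h]
      exact ih (pgcParseLine cur x)

-- ===== VERDICT (by name: the statement is the Claim_ definition above) =====
theorem process_generated_content_spec : Claim_equal_process_generated_content := by
  intro content difficulty _
  unfold Spec_process_generated_content process_generated_content process_generated_content_alt
  simp only [pgcFoldB_eq, List.nil_append]
  congr 1
  have h := pgc_main ((PySem.Str.split? content "\n").getD []) PySem.Dict.empty
  rw [← pgcG_unfold] at h
  rw [← h]
  unfold pgcEmit
  split_ifs <;> simp
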